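-- pv_equiv track=rewrite | github.com/joeyfinkel/excel-tools | Templates/base.py | insert_every_n
-- ===== SOURCE A (Python) =====
-- import itertools
--
-- def insert_every_n(l1, l2, k):
--     i1, i2 = iter(l1), iter(l2)
--     while True:
--         try:
--             yield from itertools.islice(i1, k)
--             yield next(i2)
--         except StopIteration:
--             return
-- ===== SOURCE B (Python) =====
-- def insert_every_n(l1, l2, k):
--     # simpler: index arithmetic with list slices instead of iterators and StopIteration
--     for i, x in enumerate(l2):
--         yield from l1[i * k:(i + 1) * k]
--         yield x
--     n = len(l2)
--     yield from l1[n * k:(n + 1) * k]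
-- ===== Notes on version B (the rewrite author's own statement) =====
-- stated objective: simpler
-- what changed: Replaces the while-True over two iterators with try/except StopIteration by a plain for-loop over l2 using arithmetic slices l1[i*k:(i+1)*k] and one trailing slice, so termination is structural and no iterator state is kept.
import Mathlib
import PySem

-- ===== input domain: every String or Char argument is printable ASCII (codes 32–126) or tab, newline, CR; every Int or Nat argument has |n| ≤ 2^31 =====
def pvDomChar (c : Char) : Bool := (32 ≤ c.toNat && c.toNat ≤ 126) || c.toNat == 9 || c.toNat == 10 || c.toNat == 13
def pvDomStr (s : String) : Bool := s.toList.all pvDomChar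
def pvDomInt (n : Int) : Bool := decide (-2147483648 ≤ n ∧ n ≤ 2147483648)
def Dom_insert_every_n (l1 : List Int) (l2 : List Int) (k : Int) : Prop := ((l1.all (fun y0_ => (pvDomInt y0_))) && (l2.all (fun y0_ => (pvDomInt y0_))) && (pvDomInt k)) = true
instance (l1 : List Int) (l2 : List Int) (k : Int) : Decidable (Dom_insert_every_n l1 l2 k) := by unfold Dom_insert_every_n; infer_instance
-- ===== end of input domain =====

-- B replaces A's while-True over two iterators (try/except StopIteration) by a for-loop over l2
-- with arithmetic slices of l1; objective: simpler. Equivalence is about the yielded sequence (as a list).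

-- ===== PORT A =====
-- A: repeatedly take up to k from the l1 iterator, then the next l2 element; stop when l2 is exhausted
-- (one final chunk of l1 is yielded before the StopIteration from next(i2)).
def insert_every_n (l1 : List Int) (l2 : List Int) (k : Int) : List Int :=
  match l2 with
  | [] => l1.take k.toNat
  | x :: rest => l1.take k.toNat ++ x :: insert_every_n (l1.drop k.toNat) rest k

-- ===== PORT B =====
-- B's for-loop over enumerate(l2), yielding l1[i*k:(i+1)*k] then x, then the trailing slice.
def insert_every_n_altGo (l1 : List Int) (k : Int) (i : Nat) (l2 : List Int) : List Int :=
  match l2 with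
  | [] => PySem.List.slice l1 (some ((i : Int) * k)) (some (((i : Int) + 1) * k))
  | x :: rest =>
      PySem.List.slice l1 (some ((i : Int) * k)) (some (((i : Int) + 1) * k))
        ++ x :: insert_every_n_altGo l1 k (i + 1) rest

def insert_every_n_alt (l1 : List Int) (l2 : List Int) (k : Int) : List Int :=
  insert_every_n_altGo l1 k 0 l2

-- ===== PRECONDITION & SPEC =====
-- Pre_ excludes k < 0, on which Python A raises ValueError (itertools.islice rejects negative counts).
def Pre_insert_every_n (l1 : List Int) (l2 : List Int) (k : Int) : Prop := 0 ≤ k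
instance (l1 : List Int) (l2 : List Int) (k : Int) : Decidable (Pre_insert_every_n l1 l2 k) := by unfold Pre_insert_every_n; infer_instance

def pvWitness_insert_every_n : List Int × List Int × Int := ([1, 2, 3, 4, 5], [10, 20], 2)

def Spec_insert_every_n (l1 : List Int) (l2 : List Int) (k : Int) (out : List Int) : Prop := out = insert_every_n_alt l1 l2 k
instance (l1 : List Int) (l2 : List Int) (k : Int) (out : List Int) : Decidable (Spec_insert_every_n l1 l2 k out) := by unfold Spec_insert_every_n; infer_instance

-- ===== CLAIM (what is proved, stated in full; the proofs are below) =====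
def Claim_equal_insert_every_n : Prop := ∀ (l1 : List Int) (l2 : List Int) (k : Int), Dom_insert_every_n l1 l2 k → Pre_insert_every_n l1 l2 k → Spec_insert_every_n l1 l2 k (insert_every_n l1 l2 k)

-- ===== LEMMAS AND PROOFS =====

-- For 0 ≤ k the slice l1[i*k:(i+1)*k] is take k of drop (i*k).
lemma slice_chunk (l1 : List Int) (k : Int) (i : Nat) (hk : 0 ≤ k) :
    PySem.List.slice l1 (some ((i : Int) * k)) (some (((i : Int) + 1) * k))
      = (l1.drop (i * k.toNat)).take k.toNat := by
  have hk' : k = ((k.toNat : ℕ) : Int) := (Int.toNat_of_nonneg hk).symm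
  rw [hk']
  have h1 : (i : Int) * ((k.toNat : ℕ) : Int) = ((i * k.toNat : ℕ) : Int) := by push_cast; ring
  have h2 : ((i : Int) + 1) * ((k.toNat : ℕ) : Int) = (((i + 1) * k.toNat : ℕ) : Int) := by push_cast; ring
  rw [h1, h2, PySem.List.slice_natCast]
  simp only [Int.toNat_natCast, Nat.succ_mul, Nat.add_sub_cancel_left]

lemma altGo_eq (k : Int) (hk : 0 ≤ k) :
    ∀ (l2 : List Int) (i : Nat) (l1 : List Int),
      insert_every_n_altGo l1 k i l2 = insert_every_n (l1.drop (i * k.toNat)) l2 k := by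
  intro l2
  induction l2 with
  | nil =>
      intro i l1
      simp [insert_every_n_altGo, insert_every_n, slice_chunk l1 k i hk]
  | cons x rest ih =>
      intro i l1
      simp only [insert_every_n_altGo, insert_every_n, slice_chunk l1 k i hk, ih (i + 1) l1,
        List.drop_drop]
      congr 3
      ring_nf

-- ===== VERDICT (by name: the statement is the Claim_ definition above) =====
theorem insert_every_n_spec : Claim_equal_insert_every_n := by
  intro l1 l2 k _ hk
  unfold Spec_insert_every_n insert_every_n_alt
  rw [altGo_eq k hk l2 0 l1]
  simp
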